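-- pv_equiv track=rewrite | github.com/Davies-Sam/Genetris | heuristics.py | Blockades
-- ===== SOURCE A (Python) =====
-- def ColumnHeight(board, col):
--     """#returns the heights a single column"""
--     height = len(board) -1
--     width = len(board[1])
--     #for every row in the column check for non empty board block
--     for x in range (0, height):
--         if(board[x][col] != 0):
--             return height - x
--     return 0
--
-- def Blockades(board):
--     """returns number of pieces placed above holes"""
--     height = len(board) - 1
--     width = len(board[1])
--     coords = {}
--     blockades = 0
--     for row, rowElements in enumerate(board):
--         for x in range(0, len(rowElements)):
--             coords[(x,row)] = rowElements[x]
--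
--     holes = []
--     for row, rowElements in enumerate(board):
--         for x in range(0,len(rowElements)):
--             #if the height of the column is > height of 0 cell, we know we have a hole
--             if rowElements[x] == 0 and ColumnHeight(board, x) > (height - row):
--                 holes.append((x,row))
--
--     for entry in holes:
--         x, y = entry
--         for z in range(0,y):
--             if coords[(x,z)]!= 0:
--                 blockades += 1
--     return blockades
-- ===== SOURCE B (Python) =====
-- def Blockades(board):
--     """returns number of pieces placed above holes"""
--     if not board:
--         return 0
--     total = 0
--     for col in range(len(board[0])):
--         filled = 0
--         for row in board:
--             if row[col] != 0:
--                 filled += 1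
--             elif filled:
--                 total += filled
--     return total
-- ===== Notes on version B (the rewrite author's own statement) =====
-- stated objective: faster
-- what changed: Instead of building a coordinate dict, scanning each column from the top for every zero cell to detect holes, and then re-scanning above each hole, B makes a single column-major pass keeping a running count of filled cells per column and adds that count at each hole.
-- outside the precondition, e.g. on Blockades([[8, 52, 6733], [0, 18], [], [3]]): A returns 1, B raises IndexError; on Blockades([[1], [1, 1]]): A returns 0, B returns 0
import Mathlib
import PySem

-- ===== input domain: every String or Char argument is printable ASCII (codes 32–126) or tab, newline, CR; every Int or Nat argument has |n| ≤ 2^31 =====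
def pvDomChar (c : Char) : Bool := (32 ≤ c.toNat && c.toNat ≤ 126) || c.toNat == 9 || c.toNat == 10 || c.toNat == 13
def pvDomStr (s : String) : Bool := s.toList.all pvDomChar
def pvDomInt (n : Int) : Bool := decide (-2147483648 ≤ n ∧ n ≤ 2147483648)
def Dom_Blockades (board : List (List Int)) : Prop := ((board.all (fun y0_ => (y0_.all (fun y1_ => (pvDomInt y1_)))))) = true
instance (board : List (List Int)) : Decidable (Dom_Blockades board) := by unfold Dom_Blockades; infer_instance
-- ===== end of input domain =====

-- B replaces A's coordinate dict + per-zero-cell column scan + per-hole rescan by a single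
-- column-major pass keeping a running count of filled cells per column; objective: faster.

-- ===== PORT A =====
def ColumnHeight (board : List (List Int)) (col : Int) : Int :=
  let height : Int := (board.length : Int) - 1
  match (PySem.List.pyRange 0 height 1).find?
      (fun x => !(PySem.List.pyGetD (PySem.List.pyGetD board x []) col 0 == 0)) with
  | some x => height - x
  | none => 0

def Blockades (board : List (List Int)) : Int :=
  let height : Int := (board.length : Int) - 1
  let coords : PySem.Dict (Int × Int) Int :=
    (PySem.List.enumerate board 0).foldl (fun d p =>
      (PySem.List.pyRange 0 (p.2.length : Int) 1).foldl
        (fun d x => d.insert (x, p.1) (PySem.List.pyGetD p.2 x 0)) d)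
      PySem.Dict.empty
  let holes : List (Int × Int) :=
    (PySem.List.enumerate board 0).foldl (fun hs p =>
      (PySem.List.pyRange 0 (p.2.length : Int) 1).foldl
        (fun hs x => if PySem.List.pyGetD p.2 x 0 == 0 && decide (ColumnHeight board x > height - p.1)
          then hs ++ [(x, p.1)] else hs) hs) []
  holes.foldl (fun b e =>
    (PySem.List.pyRange 0 e.2 1).foldl (fun b z =>
      if coords.getD (e.1, z) 0 != 0 then b + 1 else b) b) 0

-- ===== PORT B =====
def Blockades_alt (board : List (List Int)) : Int :=
  if board.isEmpty then 0
  else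
    (PySem.List.pyRange 0 ((board.headD []).length : Int) 1).foldl (fun total col =>
      (board.foldl (fun st row =>
        if PySem.List.pyGetD row col 0 ≠ 0 then (st.1 + 1, st.2)
        else if st.1 ≠ 0 then (st.1, st.2 + st.1) else st)
        ((0 : Int), total)).2) 0

-- ===== PRECONDITION & SPEC =====
-- Pre_ excludes boards with fewer than two rows (A evaluates len(board[1]): IndexError) and
-- non-rectangular boards, on which A's column scans / dict lookups can raise
-- IndexError/KeyError (on some ragged boards A still happens to return; see cites).
def Pre_Blockades (board : List (List Int)) : Prop :=
  2 ≤ board.length ∧ ∀ r ∈ board, r.length = (board.headD []).length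
instance (board : List (List Int)) : Decidable (Pre_Blockades board) := by
  unfold Pre_Blockades; infer_instance
def pvWitness_Blockades : List (List Int) := [[1, 0], [0, 2], [0, 0]]

def Spec_Blockades (board : List (List Int)) (out : Int) : Prop := out = Blockades_alt board
instance (board : List (List Int)) (out : Int) : Decidable (Spec_Blockades board out) := by unfold Spec_Blockades; infer_instance

-- ===== CLAIM (what is proved, stated in full; the proofs are below) =====
def Claim_equal_Blockades : Prop := ∀ (board : List (List Int)), Dom_Blockades board → Pre_Blockades board → Spec_Blockades board (Blockades board)

-- ===== LEMMAS AND PROOFS =====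

-- number of filled cells strictly above row z in column x
def cntR (rows : List (List Int)) (x z : Nat) : Int :=
  ((List.range z).countP (fun w => (rows.getD w []).getD x 0 != 0) : Int)

-- contribution of cell (row z, column x): the filled count above, if it is a hole
def FA (rows : List (List Int)) (z x : Nat) : Int :=
  if (rows.getD z []).getD x 0 = 0 ∧ cntR rows x z ≠ 0 then cntR rows x z else 0

theorem list_sum_range (g : Nat → Int) (n : Nat) :
    ((List.range n).map g).sum = ∑ i ∈ Finset.range n, g i := by
  induction n with
  | zero => simp
  | succ n ih => simp [List.range_succ, Finset.sum_range_succ, ih]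

theorem sum_filter_map {α : Type} (q : α → Bool) (g : α → Int) (l : List α) :
    ((l.filter q).map g).sum = (l.map (fun x => if q x then g x else 0)).sum := by
  induction l with
  | nil => rfl
  | cons a l ih => by_cases h : q a <;> simp [h, ih]

theorem cntR_succ_cons (r : List Int) (rs : List (List Int)) (x z : Nat) :
    cntR (r :: rs) x (z + 1) =
      (if r.getD x 0 != 0 then 1 else 0) + cntR rs x z := by
  unfold cntR
  rw [List.range_succ_eq_map, List.countP_cons, List.countP_map]
  have hcomp : ((fun w => (((r :: rs)).getD w []).getD x 0 != 0) ∘ Nat.succ)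
      = (fun w => (rs.getD w []).getD x 0 != 0) := by
    funext w; simp [Function.comp, Nat.succ_eq_add_one]
  rw [hcomp]
  by_cases h : r.getD x 0 = 0 <;> simp [h] <;> ring

theorem cntR_ne_iff (rows : List (List Int)) (x z : Nat) :
    cntR rows x z ≠ 0 ↔ ∃ w < z, (rows.getD w []).getD x 0 ≠ 0 := by
  unfold cntR
  rw [Int.natCast_ne_zero, ← Nat.pos_iff_ne_zero, List.countP_pos_iff]
  constructor
  · rintro ⟨w, hw, hp⟩
    exact ⟨w, by simpa using List.mem_range.mp hw, by simpa using hp⟩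
  · rintro ⟨w, hw, hp⟩
    exact ⟨w, List.mem_range.mpr hw, by simpa using hp⟩

-- ===== B side =====

def colRec (col : Int) (f : Int) : List (List Int) → Int
  | [] => 0
  | r :: rs => if PySem.List.pyGetD r col 0 ≠ 0 then colRec col (f + 1) rs
               else (if f ≠ 0 then f else 0) + colRec col f rs

theorem foldB (col : Int) (rows : List (List Int)) : ∀ f t : Int,
    (rows.foldl (fun st row =>
        if PySem.List.pyGetD row col 0 ≠ 0 then (st.1 + 1, st.2)
        else if st.1 ≠ 0 then (st.1, st.2 + st.1) else st) (f, t)).2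
      = t + colRec col f rows := by
  induction rows with
  | nil => intro f t; simp [colRec]
  | cons r rs ih =>
    intro f t
    simp only [List.foldl_cons]
    simp only [colRec]
    by_cases h1 : PySem.List.pyGetD r col 0 ≠ 0
    · rw [if_pos h1, if_pos h1, ih]
    · rw [if_neg h1, if_neg h1]
      by_cases h2 : f ≠ 0
      · rw [if_pos h2, if_pos h2, ih]; ring
      · rw [if_neg h2, if_neg h2, ih]; ring

theorem colRec_char (x : Nat) (rows : List (List Int)) : ∀ f : Int,
    colRec (x : Int) f rows =
      ∑ z ∈ Finset.range rows.length,
        (if (rows.getD z []).getD x 0 = 0 ∧ f + cntR rows x z ≠ 0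
         then f + cntR rows x z else 0) := by
  induction rows with
  | nil => intro f; simp [colRec]
  | cons r rs ih =>
    intro f
    simp only [List.length_cons]
    rw [Finset.sum_range_succ']
    simp only [colRec, PySem.List.pyGetD_natCast, List.getD_cons_succ, List.getD_cons_zero]
    have hc0 : cntR (r :: rs) x 0 = 0 := by simp [cntR]
    by_cases h1 : r.getD x 0 = 0
    · have h1' : r[x]?.getD 0 = 0 := by simpa using h1
      have hv : (r.getD x 0 != 0) = false := by simp [h1']
      have hsh : ∀ z, cntR (r :: rs) x (z + 1) = cntR rs x z := by
        intro z; rw [cntR_succ_cons, hv]; simp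
      rw [if_neg (fun h => h h1), ih f]
      simp only [hsh, hc0, add_zero]
      have hlast : (if r.getD x 0 = 0 ∧ f ≠ 0 then f else 0) = (if f ≠ 0 then f else 0) := by
        simp [h1']
      rw [hlast]; ring
    · have h1' : ¬ r[x]?.getD 0 = 0 := by simpa using h1
      have hv : (r.getD x 0 != 0) = true := by simp [h1']
      have hsh : ∀ z, cntR (r :: rs) x (z + 1) = 1 + cntR rs x z := by
        intro z; rw [cntR_succ_cons, hv]; simp
      rw [if_pos h1, ih (f + 1)]
      simp only [hsh, hc0, add_zero]
      have hlast : (if r.getD x 0 = 0 ∧ f ≠ 0 then f else 0) = 0 := by simp [h1']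
      rw [hlast, add_zero]
      apply Finset.sum_congr rfl
      intro z _
      have harith : f + (1 + cntR rs x z) = f + 1 + cntR rs x z := by ring
      rw [harith]

theorem B_total (board : List (List Int)) (hne : board ≠ []) :
    Blockades_alt board =
      ∑ x ∈ Finset.range (board.headD []).length,
        ∑ z ∈ Finset.range board.length, FA board z x := by
  unfold Blockades_alt
  rw [if_neg (by simp [hne])]
  rw [PySem.List.pyRange_zero_nat, List.foldl_map]
  rw [PySem.List.foldl_congr_mem _ _ (fun (acc : Int) (k : Nat) => acc + colRec (k : Int) 0 board) _
    (by intro acc k _; rw [foldB])]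
  rw [PySem.List.foldl_add, zero_add, list_sum_range]
  apply Finset.sum_congr rfl
  intro x _
  rw [colRec_char x board 0]
  apply Finset.sum_congr rfl
  intro z _
  simp [FA]

-- ===== A side =====

theorem inner_coords (r : List Int) (s x z : Int) :
    ∀ (n : Nat) (d : PySem.Dict (Int × Int) Int),
    ((PySem.List.pyRange 0 (n : Int) 1).foldl
        (fun d x' => d.insert (x', s) (PySem.List.pyGetD r x' 0)) d).getD (x, z) 0 =
      if z = s ∧ 0 ≤ x ∧ x < (n : Int) then PySem.List.pyGetD r x 0 else d.getD (x, z) 0 := by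
  intro n
  induction n with
  | zero =>
    intro d
    simp only [Nat.cast_zero]
    rw [PySem.List.pyRange_one_eq_nil (le_refl 0), List.foldl_nil,
      if_neg (by rintro ⟨h1, h2, h3⟩; omega)]
  | succ n ih =>
    intro d
    have hcast : ((n + 1 : Nat) : Int) = (n : Int) + 1 := by push_cast; ring
    rw [hcast, PySem.List.pyRange_one_succ_right (Int.natCast_nonneg n), List.foldl_append,
      List.foldl_cons, List.foldl_nil, PySem.Dict.getD_insert]
    by_cases hx : ((x, z) : Int × Int) = ((n : Int), s)
    · obtain ⟨hx1, hx2⟩ := Prod.mk.injEq .. ▸ hx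
      rw [if_pos hx, if_pos ⟨hx2, by omega, by omega⟩, hx1]
    · rw [if_neg hx, ih d]
      by_cases hc : z = s ∧ 0 ≤ x ∧ x < (n : Int)
      · obtain ⟨h1, h2, h3⟩ := hc
        rw [if_pos ⟨h1, h2, h3⟩, if_pos ⟨h1, h2, by omega⟩]
      · have hnc : ¬ (z = s ∧ 0 ≤ x ∧ x < (n : Int) + 1) := by
          rintro ⟨h1, h2, h3⟩
          by_cases hxe : x = (n : Int)
          · exact hx (by rw [hxe, h1])
          · exact hc ⟨h1, h2, by omega⟩
        rw [if_neg hc, if_neg hnc]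

theorem coords_lower (x z : Int) :
    ∀ (rows : List (List Int)) (s : Int) (d : PySem.Dict (Int × Int) Int), z < s →
    ((PySem.List.enumerate rows s).foldl (fun d p =>
      (PySem.List.pyRange 0 (p.2.length : Int) 1).foldl
        (fun d x' => d.insert (x', p.1) (PySem.List.pyGetD p.2 x' 0)) d) d).getD (x, z) 0
      = d.getD (x, z) 0 := by
  intro rows
  induction rows with
  | nil => intro s d _; simp [PySem.List.enumerate]
  | cons r rs ih =>
    intro s d hz
    rw [PySem.List.enumerate_cons, List.foldl_cons, ih (s + 1) _ (by omega),
      inner_coords r s x z r.length d, if_neg (by rintro ⟨h1, _, _⟩; omega)]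

theorem coords_getD (x : Int) :
    ∀ (rows : List (List Int)) (k : Nat) (s z : Int) (d : PySem.Dict (Int × Int) Int),
    k < rows.length → z = s + k → 0 ≤ x → x < ((rows.getD k []).length : Int) →
    ((PySem.List.enumerate rows s).foldl (fun d p =>
      (PySem.List.pyRange 0 (p.2.length : Int) 1).foldl
        (fun d x' => d.insert (x', p.1) (PySem.List.pyGetD p.2 x' 0)) d) d).getD (x, z) 0
      = PySem.List.pyGetD (rows.getD k []) x 0 := by
  intro rows
  induction rows with
  | nil => intro k s z d hk _ _ _; simp at hk
  | cons r rs ih =>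
    intro k s z d hk hz hx0 hxlt
    rw [PySem.List.enumerate_cons, List.foldl_cons]
    cases k with
    | zero =>
      have hzs : z = s := by simpa using hz
      rw [coords_lower x z rs (s + 1) _ (by omega),
        inner_coords r s x z r.length _,
        if_pos ⟨hzs, hx0, by simpa using hxlt⟩]
      simp
    | succ k' =>
      have := ih k' (s + 1) z ((PySem.List.pyRange 0 (r.length : Int) 1).foldl
          (fun d x' => d.insert (x', s) (PySem.List.pyGetD r x' 0)) d)
        (by simpa using hk) (by push_cast at hz ⊢; omega) hx0 (by simpa using hxlt)
      simpa using this

theorem find?_range_min (p : Nat → Bool) :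
    ∀ (n z0 : Nat), (List.range n).find? p = some z0 →
      p z0 = true ∧ z0 < n ∧ ∀ w < z0, ¬ p w = true := by
  intro n
  induction n with
  | zero => intro z0 h; simp at h
  | succ n ih =>
    intro z0 h
    rw [List.range_succ, List.find?_append] at h
    cases hf : (List.range n).find? p with
    | some z1 =>
      rw [hf, Option.some_or] at h
      obtain rfl := Option.some.inj h
      obtain ⟨hp, hlt, hmin⟩ := ih z1 hf
      exact ⟨hp, by omega, hmin⟩
    | none =>
      rw [hf, Option.none_or] at h
      have hnone := List.find?_eq_none.mp hf
      by_cases hpn : p n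
      · simp only [List.find?, hpn] at h
        obtain rfl := Option.some.inj h
        refine ⟨hpn, by omega, fun w hw => ?_⟩
        have := hnone w (List.mem_range.mpr (by omega))
        simpa using this
      · rw [Bool.not_eq_true] at hpn
        simp only [List.find?, hpn] at h
        exact absurd h (by simp)

theorem CH_gt (board : List (List Int)) (hH : 2 ≤ board.length) (x row : Nat)
    (hrow : row < board.length) :
    (ColumnHeight board (x : Int) > ((board.length : Int) - 1) - (row : Int)) ↔
      ∃ w < row, (board.getD w []).getD x 0 ≠ 0 := by
  unfold ColumnHeight
  dsimp only
  have hc : ((board.length : Int) - 1) = ((board.length - 1 : Nat) : Int) := by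
    omega
  rw [hc, PySem.List.pyRange_zero_nat, List.find?_map]
  have hpred : ((fun x' => !(PySem.List.pyGetD (PySem.List.pyGetD board x' []) (x : Int) 0 == 0)) ∘
      (fun (k : Nat) => (k : Int))) = fun w => !((board.getD w []).getD x 0 == 0) := by
    funext w; simp [Function.comp, PySem.List.pyGetD_natCast]
  rw [hpred]
  cases hf : (List.range (board.length - 1)).find? (fun w => !((board.getD w []).getD x 0 == 0)) with
  | none =>
    simp only [Option.map_none]
    have hnone := List.find?_eq_none.mp hf
    constructor
    · intro hgt; exfalso; omega
    · rintro ⟨w, hw, hne⟩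
      exfalso
      have hw' : w ∈ List.range (board.length - 1) := List.mem_range.mpr (by omega)
      have := hnone w hw'
      simp at this
      exact hne this
  | some z0 =>
    simp only [Option.map_some]
    obtain ⟨hp, hlt, hmin⟩ := find?_range_min _ _ _ hf
    have hpz : (board.getD z0 []).getD x 0 ≠ 0 := by simpa using hp
    constructor
    · intro hgt
      exact ⟨z0, by omega, hpz⟩
    · rintro ⟨w, hw, hne⟩
      by_contra hngt
      have hz0w : z0 ≥ row := by omega
      have := hmin w (by omega)
      simp at this
      exact hne this

theorem sum_flatMap {α : Type} (h : α → List Int) (l : List α) :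
    (l.flatMap h).sum = (l.map (fun p => (h p).sum)).sum := by
  induction l with
  | nil => rfl
  | cons a l ih => simp [List.flatMap_cons, List.sum_append, ih]

theorem A_total (board : List (List Int)) (hPre : Pre_Blockades board) :
    Blockades board =
      ∑ z ∈ Finset.range board.length,
        ∑ x ∈ Finset.range (board.headD []).length, FA board z x := by
  obtain ⟨hH, hrect⟩ := hPre
  have hlen : ∀ z : Nat, z < board.length →
      (board.getD z []).length = (board.headD []).length := by
    intro z hz
    rw [List.getD_eq_getElem _ _ hz]
    exact hrect _ (List.getElem_mem hz)
  unfold Blockades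
  dsimp only
  set cds := (List.foldl (fun d p =>
      List.foldl (fun d x => d.insert (x, p.1) (PySem.List.pyGetD p.2 x 0)) d
        (PySem.List.pyRange 0 ↑p.2.length)) PySem.Dict.empty (PySem.List.enumerate board))
    with hcds
  have hcd : ∀ (xx w : Nat), w < board.length → xx < (board.headD []).length →
      cds.getD ((xx : Int), (w : Int)) 0 = (board.getD w []).getD xx 0 := by
    intro xx w hw hxx
    rw [hcds, coords_getD (xx : Int) board w 0 (w : Int) PySem.Dict.empty hw
      (by simp) (Int.natCast_nonneg xx)
      (by rw [hlen w hw]; exact_mod_cast hxx), PySem.List.pyGetD_natCast]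
  rw [PySem.List.foldl_congr_mem (PySem.List.enumerate board) _
    (fun hs p => hs ++ ((PySem.List.pyRange 0 (p.2.length : Int) 1).filter
      (fun x => PySem.List.pyGetD p.2 x 0 == 0 &&
        decide (ColumnHeight board x > (board.length : Int) - 1 - p.1))).map
      (fun x => (x, p.1))) []
    (by intro acc p _; rw [PySem.List.foldl_append_if])]
  rw [PySem.List.foldl_append_eq_flatMap, List.nil_append]
  rw [PySem.List.foldl_congr_mem _ _
    (fun (b : Int) (e : Int × Int) => b +
      (((PySem.List.pyRange 0 e.2 1).countP (fun z => cds.getD (e.1, z) 0 != 0) : Nat) : Int)) 0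
    (by intro acc e _; rw [PySem.List.foldl_count_if])]
  rw [PySem.List.foldl_add, zero_add, List.map_flatMap, sum_flatMap]
  have henum : PySem.List.enumerate board 0 =
      (List.range board.length).map (fun (z : Nat) => ((z : Int), board.getD z [])) := by
    rw [PySem.List.enumerate_eq_map_pyRange board ([] : List Int)]
    rw [show PySem.List.len board = ((board.length : Nat) : Int) from by simp]
    rw [PySem.List.pyRange_zero_nat, List.map_map]
    apply List.map_congr_left
    intro z _
    simp [Function.comp, PySem.List.pyGetD_natCast]
  rw [henum, List.map_map, list_sum_range]
  apply Finset.sum_congr rfl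
  intro z hz
  have hzH : z < board.length := Finset.mem_range.mp hz
  dsimp only [Function.comp]
  rw [hlen z hzH, PySem.List.pyRange_zero_nat, List.filter_map, List.map_map, List.map_map,
    sum_filter_map, list_sum_range]
  apply Finset.sum_congr rfl
  intro x hx
  have hxW : x < (board.headD []).length := Finset.mem_range.mp hx
  dsimp only [Function.comp]
  have hcnt : (((PySem.List.pyRange 0 ((z : Nat) : Int) 1).countP
      (fun w => cds.getD ((x : Int), w) 0 != 0) : Nat) : Int) = cntR board x z := by
    rw [PySem.List.pyRange_zero_nat, List.countP_map, cntR]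
    congr 1
    apply List.countP_congr
    intro w hw
    have hwz : w < z := List.mem_range.mp hw
    simp only [Function.comp]
    rw [hcd x w (by omega) hxW]
  have hq : (PySem.List.pyGetD (board.getD z []) (x : Int) 0 == 0 &&
      decide (ColumnHeight board (x : Int) > (board.length : Int) - 1 - (z : Int))) = true ↔
      ((board.getD z []).getD x 0 = 0 ∧ cntR board x z ≠ 0) := by
    rw [Bool.and_eq_true, beq_iff_eq, decide_eq_true_iff, PySem.List.pyGetD_natCast]
    constructor
    · rintro ⟨h1, h2⟩
      refine ⟨h1, (cntR_ne_iff board x z).mpr ?_⟩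
      exact (CH_gt board hH x z hzH).mp (by exact_mod_cast h2)
    · rintro ⟨h1, h2⟩
      refine ⟨h1, ?_⟩
      have := (CH_gt board hH x z hzH).mpr ((cntR_ne_iff board x z).mp h2)
      exact_mod_cast this
  unfold FA
  by_cases hcase : (board.getD z []).getD x 0 = 0 ∧ cntR board x z ≠ 0
  · rw [if_pos (hq.mpr hcase), if_pos hcase, hcnt]
  · rw [if_neg (fun h => hcase (hq.mp h)), if_neg hcase]

-- ===== VERDICT (by name: the statement is the Claim_ definition above) =====
theorem Blockades_spec : Claim_equal_Blockades := by
  intro board _ hPre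
  unfold Spec_Blockades
  rw [A_total board hPre, B_total board (by
    intro h; rw [h] at hPre; exact absurd hPre.1 (by simp)), Finset.sum_comm]
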